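-- pv_equiv track=rewrite | github.com/DorianKid/LinerarAlgebraApp | App/pages/2_😎_Matrices_and_Determinants.py | determinant_procedure
-- ===== SOURCE A (Python) =====
-- def determinant_procedure(matrix):
--     def determinant_step(matrix, step):
--         n = len(matrix)
--         if n == 2:
--             elements = matrix[0][0], matrix[0][1], matrix[1][0], matrix[1][1]
--             a, b, c, d = elements
--             if step == 1:
--                 al, bl, cl, dl = [f"({i})" if i < 0 else f"{i}" for i in elements]
--                 return f"[{al} \\cdot {dl} - ({bl} \\cdot {cl})]"
--             elif step == 2:
--                 ad, bc = [f"({i*j})" if i*j < 0 else f"{i*j}" for i, j in zip([a,b],[d,c])]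
--                 return f"[{ad} - {bc}]"
--             else:
--                 return f"{a*d - b*c}" if a*d - b*c >= 0 else f"({a*d - b*c})"
--
--         latex = ""
--         for c in range(n):
--             sub_matrix = [row[:c] + row[c+1:] for row in matrix[1:]]
--             sign = (-1) ** (1 + c + 1)
--             element = matrix[0][c]
--
--             if step == 1:
--                 term = f"(-1)^{{1+{c+1}}}" + (f" \\cdot ({element})" if element < 0 else f" \\cdot {element}")
--             elif step == 2:
--                 term = f"(-1)^{{{1+c+1}}}" + (f" \\cdot ({element})" if element < 0 else f" \\cdot {element}")
--             elif step == 3: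
--                 term = f"{sign * element}" if sign * element >= 0 else f"({sign * element})"
--
--             latex += f"{term} \\cdot {determinant_step(sub_matrix, step)} + "
--
--         return latex[:-3]  # Remove the last " + "
--
--     return [determinant_step(matrix, i) for i in range(1, 4)]
-- ===== SOURCE B (Python) =====
-- def determinant_procedure(matrix):
--     # Single recursion computing the three step strings simultaneously,
--     # joining terms with " + ".join instead of append-then-trim.
--     def par(v):
--         return f"({v})" if v < 0 else f"{v}"
--
--     def steps(m):
--         n = len(m)
--         if n == 2:
--             a, b, c, d = m[0][0], m[0][1], m[1][0], m[1][1]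
--             return (f"[{par(a)} \\cdot {par(d)} - ({par(b)} \\cdot {par(c)})]",
--                     f"[{par(a * d)} - {par(b * c)}]",
--                     par(a * d - b * c))
--         p1, p2, p3 = [], [], []
--         for c in range(n):
--             e = m[0][c]
--             sub = [row[:c] + row[c + 1:] for row in m[1:]]
--             r1, r2, r3 = steps(sub)
--             p1.append(f"(-1)^{{1+{c + 1}}} \\cdot {par(e)} \\cdot {r1}")
--             p2.append(f"(-1)^{{{c + 2}}} \\cdot {par(e)} \\cdot {r2}")
--             p3.append(f"{par(e if c % 2 == 0 else -e)} \\cdot {r3}")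
--         return (" + ".join(p1), " + ".join(p2), " + ".join(p3))
--
--     return list(steps(matrix))
-- ===== Notes on version B (the rewrite author's own statement) =====
-- stated objective: alternative
-- what changed: One recursive pass returns the LaTeX strings of all three steps as a triple (A re-runs the whole cofactor recursion once per step) and joins the per-column terms with ' + '.join instead of concatenate-then-trim.
import Mathlib
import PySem

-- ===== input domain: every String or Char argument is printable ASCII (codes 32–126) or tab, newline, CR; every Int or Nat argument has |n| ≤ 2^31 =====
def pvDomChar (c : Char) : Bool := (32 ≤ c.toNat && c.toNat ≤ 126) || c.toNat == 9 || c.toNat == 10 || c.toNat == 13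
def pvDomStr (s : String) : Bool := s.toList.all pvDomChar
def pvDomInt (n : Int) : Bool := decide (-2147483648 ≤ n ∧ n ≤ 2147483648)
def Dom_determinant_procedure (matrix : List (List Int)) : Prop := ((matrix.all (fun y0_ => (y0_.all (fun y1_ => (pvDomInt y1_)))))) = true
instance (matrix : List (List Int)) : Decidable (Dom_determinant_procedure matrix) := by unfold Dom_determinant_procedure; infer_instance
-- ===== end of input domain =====

-- B computes the three step strings in ONE recursion returning a triple (A re-runs the
-- recursion once per step) and joins terms with " + ".join instead of append-then-trim.

-- ===== PORT A =====
-- matrix[0][c] etc.: always in range on Pre_ inputs (A raises IndexError outside, excluded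
-- by Pre_); getD defaults are only reached outside Pre_, where nothing is claimed.
-- The Nat fuel bounds the recursion depth; it is matrix.length + 1 at top level and the
-- recursion depth on any input is at most that, so fuel never runs out.
def detStepA : Nat → Int → List (List Int) → String
  | 0, _, _ => ""
  | fuel + 1, step, m =>
    let n := m.length
    if n == 2 then
      let a := (m.getD 0 []).getD 0 0
      let b := (m.getD 0 []).getD 1 0
      let c := (m.getD 1 []).getD 0 0
      let d := (m.getD 1 []).getD 1 0
      if step == 1 then
        let al := if a < 0 then "(" ++ PySem.Int.toStr a ++ ")" else PySem.Int.toStr a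
        let bl := if b < 0 then "(" ++ PySem.Int.toStr b ++ ")" else PySem.Int.toStr b
        let cl := if c < 0 then "(" ++ PySem.Int.toStr c ++ ")" else PySem.Int.toStr c
        let dl := if d < 0 then "(" ++ PySem.Int.toStr d ++ ")" else PySem.Int.toStr d
        "[" ++ al ++ " \\cdot " ++ dl ++ " - (" ++ bl ++ " \\cdot " ++ cl ++ ")]"
      else if step == 2 then
        let ad := if a * d < 0 then "(" ++ PySem.Int.toStr (a * d) ++ ")" else PySem.Int.toStr (a * d)
        let bc := if b * c < 0 then "(" ++ PySem.Int.toStr (b * c) ++ ")" else PySem.Int.toStr (b * c)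
        "[" ++ ad ++ " - " ++ bc ++ "]"
      else
        if a * d - b * c ≥ 0 then PySem.Int.toStr (a * d - b * c)
        else "(" ++ PySem.Int.toStr (a * d - b * c) ++ ")"
    else
      let latex := (List.range n).foldl (fun acc c =>
        let sub := (m.drop 1).map (fun row => row.take c ++ row.drop (c + 1))
        let sign : Int := (-1) ^ (1 + c + 1)
        let element := (m.getD 0 []).getD c 0
        let term :=
          if step == 1 then
            "(-1)^{1+" ++ PySem.Int.toStr ((c : Int) + 1) ++ "}" ++
              (if element < 0 then " \\cdot (" ++ PySem.Int.toStr element ++ ")"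
               else " \\cdot " ++ PySem.Int.toStr element)
          else if step == 2 then
            "(-1)^{" ++ PySem.Int.toStr (1 + (c : Int) + 1) ++ "}" ++
              (if element < 0 then " \\cdot (" ++ PySem.Int.toStr element ++ ")"
               else " \\cdot " ++ PySem.Int.toStr element)
          else
            if sign * element ≥ 0 then PySem.Int.toStr (sign * element)
            else "(" ++ PySem.Int.toStr (sign * element) ++ ")"
        acc ++ term ++ " \\cdot " ++ detStepA fuel step sub ++ " + ") ""
      PySem.Str.slice latex none (some (-3))

def determinant_procedure (matrix : List (List Int)) : List String :=
  (PySem.List.pyRange 1 4 1).map (fun i => detStepA (matrix.length + 1) i matrix)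

-- ===== PORT B =====
def parB (v : Int) : String :=
  if v < 0 then "(" ++ PySem.Int.toStr v ++ ")" else PySem.Int.toStr v

def detStepsB : Nat → List (List Int) → String × String × String
  | 0, _ => ("", "", "")
  | fuel + 1, m =>
    let n := m.length
    if n == 2 then
      let a := (m.getD 0 []).getD 0 0
      let b := (m.getD 0 []).getD 1 0
      let c := (m.getD 1 []).getD 0 0
      let d := (m.getD 1 []).getD 1 0
      ("[" ++ parB a ++ " \\cdot " ++ parB d ++ " - (" ++ parB b ++ " \\cdot " ++ parB c ++ ")]",
       "[" ++ parB (a * d) ++ " - " ++ parB (b * c) ++ "]",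
       parB (a * d - b * c))
    else
      let ps := (List.range n).foldl
        (fun (acc : List String × List String × List String) c =>
          let e := (m.getD 0 []).getD c 0
          let sub := (m.drop 1).map (fun row => row.take c ++ row.drop (c + 1))
          let r := detStepsB fuel sub
          (acc.1 ++ ["(-1)^{1+" ++ PySem.Int.toStr ((c : Int) + 1) ++ "} \\cdot " ++ parB e ++ " \\cdot " ++ r.1],
           acc.2.1 ++ ["(-1)^{" ++ PySem.Int.toStr ((c : Int) + 2) ++ "} \\cdot " ++ parB e ++ " \\cdot " ++ r.2.1],
           acc.2.2 ++ [parB (if c % 2 == 0 then e else -e) ++ " \\cdot " ++ r.2.2]))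
        ([], [], [])
      (PySem.Str.join " + " ps.1, PySem.Str.join " + " ps.2.1, PySem.Str.join " + " ps.2.2)

def determinant_procedure_alt (matrix : List (List Int)) : List String :=
  let s := detStepsB (matrix.length + 1) matrix
  [s.1, s.2.1, s.2.2]

-- ===== PRECONDITION & SPEC =====
-- A raises IndexError exactly when some row is shorter than the number of rows
-- (matrix[0][c] or a 2×2 base-case access runs off a short row); Pre_ excludes exactly
-- those inputs, on which B raises as well.
def Pre_determinant_procedure (matrix : List (List Int)) : Prop :=
  ∀ row ∈ matrix, matrix.length ≤ row.length
instance (matrix : List (List Int)) : Decidable (Pre_determinant_procedure matrix) := by unfold Pre_determinant_procedure; infer_instance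

def pvWitness_determinant_procedure : List (List Int) := [[1, -2], [3, 4]]

def Spec_determinant_procedure (matrix : List (List Int)) (out : List String) : Prop := out = determinant_procedure_alt matrix
instance (matrix : List (List Int)) (out : List String) : Decidable (Spec_determinant_procedure matrix out) := by unfold Spec_determinant_procedure; infer_instance

-- ===== CLAIM (what is proved, stated in full; the proofs are below) =====
def Claim_equal_determinant_procedure : Prop := ∀ (matrix : List (List Int)), Dom_determinant_procedure matrix → Pre_determinant_procedure matrix → Spec_determinant_procedure matrix (determinant_procedure matrix)

-- ===== LEMMAS AND PROOFS =====

-- A's loop: accumulate 'term ++ " \\cdot " ++ child ++ " + "' over range n, as flat char lists.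
theorem foldA_chunks (t r : Nat → String) : ∀ (l : List Nat) (acc : String),
    (l.foldl (fun a c => a ++ t c ++ " \\cdot " ++ r c ++ " + ") acc).toList
      = acc.toList ++ (l.map (fun c =>
          ((t c).toList ++ (" \\cdot ").toList ++ (r c).toList) ++ (" + ").toList)).flatten := by
  intro l
  induction l with
  | nil => simp
  | cons x xs ih => intro acc; simp [ih]

-- concatenating "chunk + sep" for every chunk, then trimming the final sep, is join sep.
theorem flatten_sep (sep : List Char) : ∀ (l : List (List Char)), l ≠ [] →
    (l.map (· ++ sep)).flatten = PySem.Chars.join sep l ++ sep := by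
  intro l
  induction l with
  | nil => simp
  | cons x xs ih =>
    intro _
    cases xs with
    | nil => simp [PySem.Chars.join_singleton]
    | cons y ys =>
      rw [List.map_cons, List.flatten_cons, ih (by simp), PySem.Chars.join_cons_cons]
      simp [List.append_assoc]

theorem trim_join (l : List (List Char)) :
    ((l.map (· ++ (" + ").toList)).flatten.take
      ((l.map (· ++ (" + ").toList)).flatten.length - 3))
      = PySem.Chars.join (" + ").toList l := by
  cases h : l with
  | nil => simp [PySem.Chars.join_nil]
  | cons x xs =>
    rw [flatten_sep _ _ (by simp)]
    have h3 : (" + ").toList.length = 3 := by decide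
    rw [List.length_append, h3, Nat.add_sub_cancel, List.take_left]

theorem trim_join' (f : Nat → List Char) (l : List Nat) :
    ((l.map (fun c => f c ++ (" + ").toList)).flatten.take
      ((l.map (fun c => f c ++ (" + ").toList)).flatten.length - 3))
      = PySem.Chars.join (" + ").toList (l.map f) := by
  rw [show (l.map fun c => f c ++ (" + ").toList) = (l.map f).map (· ++ (" + ").toList) by simp]
  exact trim_join _

-- each of A's three per-step loops, trimmed, equals the join of per-column strings b c
theorem sliceFold_eq_join (t r b : Nat → String) (n : Nat)
    (h : ∀ c < n, (t c).toList ++ (" \\cdot ").toList ++ (r c).toList = (b c).toList) :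
    PySem.Str.slice ((List.range n).foldl
        (fun acc c => acc ++ t c ++ " \\cdot " ++ r c ++ " + ") "") none (some (-3))
      = PySem.Str.join " + " ((List.range n).map b) := by
  apply String.toList_injective
  have hs : ∀ s : String, (PySem.Str.slice s none (some (-3))).toList
      = s.toList.take (s.toList.length - 3) := by
    intro s
    simp [PySem.Str.slice]
    rw [PySem.List.slice_to_neg_ofNat _ 3 (by omega)]
    simp
  rw [hs, foldA_chunks]
  simp only [show ("":String).toList = [] from rfl, List.nil_append]
  rw [trim_join' (fun c => (t c).toList ++ (" \\cdot ").toList ++ (r c).toList)]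
  simp only [PySem.Str.join, List.map_map, String.toList_ofList]
  congr 1
  apply List.map_congr_left
  intro c hc
  exact h c (List.mem_range.mp hc)

-- B's triple-accumulator fold is three independent map-building folds.
theorem foldB_eq_maps (l : List Nat) (e1 e2 e3 : Nat → String) :
    l.foldl (fun (acc : List String × List String × List String) c =>
      (acc.1 ++ [e1 c], acc.2.1 ++ [e2 c], acc.2.2 ++ [e3 c])) ([], [], [])
    = (l.map e1, l.map e2, l.map e3) := by
  rw [PySem.List.foldl_prod_mk (f := fun a c => a ++ [e1 c])
      (g := fun (p : List String × List String) c => (p.1 ++ [e2 c], p.2 ++ [e3 c]))]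
  rw [PySem.List.foldl_prod_mk (f := fun a c => a ++ [e2 c]) (g := fun a c => a ++ [e3 c])]
  simp only [PySem.List.foldl_append_singleton_eq_map, List.nil_append]

-- the sign (-1)^(1+c+1) times the element, as B computes it
theorem pvSignMul (c : Nat) (e : Int) :
    ((-1:Int))^(1+c+1) * e = if c % 2 == 0 then e else -e := by
  have h : ((-1:Int))^(1+c+1) = (-1)^c := by rw [show 1+c+1 = c+2 by ring, pow_add]; norm_num
  rw [h]
  rcases Nat.even_or_odd c with he | ho
  · simp [he.neg_one_pow, Nat.even_iff.mp he]
  · simp [ho.neg_one_pow, Nat.odd_iff.mp ho]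

-- the single recursion of B computes, step by step, the three strings of A
theorem stepAB : ∀ (fuel : Nat) (m : List (List Int)),
    detStepA fuel 1 m = (detStepsB fuel m).1 ∧
    detStepA fuel 2 m = (detStepsB fuel m).2.1 ∧
    detStepA fuel 3 m = (detStepsB fuel m).2.2 := by
  intro fuel
  induction fuel with
  | zero => intro m; exact ⟨rfl, rfl, rfl⟩
  | succ k ih =>
    intro m
    by_cases h2 : m.length = 2
    · refine ⟨?_, ?_, ?_⟩
      · simp only [detStepA, detStepsB, h2, parB]; norm_num
      · simp only [detStepA, detStepsB, h2, parB]; norm_num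
      · simp only [detStepA, detStepsB, h2, parB]
        norm_num
        split_ifs <;> first | rfl | omega
    · -- recursive case: n ≠ 2
      simp only [detStepA, detStepsB, beq_iff_eq, h2, if_false]
      rw [foldB_eq_maps]
      refine ⟨?_, ?_, ?_⟩
      · norm_num
        apply sliceFold_eq_join
        intro c hc
        rw [(ih _).1]
        by_cases he : (m[0]?.getD [])[c]?.getD 0 < 0 <;>
          simp [parB, he, List.append_assoc]
      · norm_num
        apply sliceFold_eq_join
        intro c hc
        rw [(ih _).2.1, show 1+(c:Int)+1 = (c:Int)+2 from by ring]
        by_cases he : (m[0]?.getD [])[c]?.getD 0 < 0 <;>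
          simp [parB, he, List.append_assoc]
      · norm_num
        apply sliceFold_eq_join
        intro c hc
        rw [(ih _).2.2]
        simp only [pvSignMul, parB, beq_iff_eq]
        split_ifs <;> first | omega | simp [List.append_assoc]

-- ===== VERDICT (by name: the statement is the Claim_ definition above) =====
theorem determinant_procedure_spec : Claim_equal_determinant_procedure := by
  intro m _ _
  unfold Spec_determinant_procedure determinant_procedure determinant_procedure_alt
  rw [show PySem.List.pyRange 1 4 1 = [1, 2, 3] from rfl]
  obtain ⟨h1, h2, h3⟩ := stepAB (m.length + 1) m
  simp [h1, h2, h3]
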